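-- pv_equiv track=rewrite | github.com/dalejung/earthdragon | earthdragon/typecheck.py | module_tree
-- ===== SOURCE A (Python) =====
-- def module_tree(module: str):
--     tree = []
--     target_module = module
--     while True:
--         if not target_module: # reached top
--             break
--         tree.append(target_module)
--         target_module, _, sub = target_module.rpartition('.')
--
--     return tree
-- ===== SOURCE B (Python) =====
-- def module_tree(module: str):
--     if not module:
--         return []
--     dots = [i for i, c in enumerate(module) if c == '.']
--     out = [module]
--     for i in reversed(dots):
--         if i == 0:
--             break
--         out.append(module[:i])
--     return out
-- ===== Notes on version B (the rewrite author's own statement) =====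
-- stated objective: alternative
-- what changed: B computes all dot indices in one enumerate pass and slices right-to-left with a break at an empty prefix, instead of repeatedly rescanning shrinking strings with rpartition.
import Mathlib
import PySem

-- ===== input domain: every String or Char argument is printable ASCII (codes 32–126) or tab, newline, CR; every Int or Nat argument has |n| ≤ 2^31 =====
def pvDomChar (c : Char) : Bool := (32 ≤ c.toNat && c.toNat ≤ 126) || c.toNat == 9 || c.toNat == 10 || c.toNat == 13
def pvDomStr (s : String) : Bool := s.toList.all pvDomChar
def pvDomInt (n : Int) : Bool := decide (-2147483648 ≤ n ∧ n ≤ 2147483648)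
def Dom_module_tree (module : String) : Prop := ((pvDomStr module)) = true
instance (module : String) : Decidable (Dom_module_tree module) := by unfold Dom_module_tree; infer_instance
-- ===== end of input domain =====

-- B builds the dot-index list once and slices right-to-left instead of repeated rpartition scans (alternative decomposition).


-- ===== PORT A =====
/-- the first component of `target.rpartition('.')`: the chars before the last '.', `[]` if there is none -/
def rpredDot (l : List Char) : List Char :=
  match l.reverse.dropWhile (fun c => c ≠ '.') with
  | [] => []
  | _ :: rest => rest.reverse

lemma rpredDot_length_lt (l : List Char) (h : ¬ l = []) : (rpredDot l).length < l.length := by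
  unfold rpredDot
  cases hd : l.reverse.dropWhile (fun c => c ≠ '.') with
  | nil => simpa [List.length_pos_iff] using h
  | cons c rest =>
    have hle : (l.reverse.dropWhile (fun c => c ≠ '.')).length ≤ l.reverse.length :=
      (List.dropWhile_sublist _).length_le
    rw [hd] at hle
    simp only [List.length_cons, List.length_reverse] at hle ⊢
    omega

/-- the while loop of A: append the current module, recurse on its rpartition prefix -/
def treeAux (l : List Char) : List (List Char) :=
  if _h : l = [] then []
  else l :: treeAux (rpredDot l)
termination_by l.length
decreasing_by exact rpredDot_length_lt l _h

def module_tree (module : String) : List String :=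
  (treeAux module.toList).map String.ofList

-- ===== PORT B =====
/-- `[i for i, c in enumerate(module) if c == '.']` -/
def dotIdxs : List Char → List Nat
  | [] => []
  | c :: rest => (if c = '.' then [0] else []) ++ (dotIdxs rest).map (· + 1)

/-- the `for i in reversed(dots)` loop of B appending slices, with the `break` at i = 0 -/
def bLoop (l : List Char) : List Nat → List (List Char)
  | [] => []
  | i :: rest => if i = 0 then [] else l.take i :: bLoop l rest

def module_tree_alt (module : String) : List String :=
  let l := module.toList
  if l.isEmpty then []
  else (l :: bLoop l (dotIdxs l).reverse).map String.ofList

-- ===== PRECONDITION & SPEC =====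
def Spec_module_tree (module : String) (out : List String) : Prop := out = module_tree_alt module
instance (module : String) (out : List String) : Decidable (Spec_module_tree module out) := by unfold Spec_module_tree; infer_instance

-- ===== CLAIM (what is proved, stated in full; the proofs are below) =====
def Claim_equal_module_tree : Prop := ∀ (module : String), Dom_module_tree module → Spec_module_tree module (module_tree module)

-- ===== LEMMAS AND PROOFS =====

lemma dotIdxs_lt (l : List Char) : ∀ i ∈ dotIdxs l, i < l.length := by
  induction l with
  | nil => simp [dotIdxs]
  | cons c rest ih =>
    intro i hi
    simp only [dotIdxs, List.mem_append, List.mem_map] at hi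
    rcases hi with hi | ⟨j, hj, rfl⟩
    · split at hi <;> simp_all
    · have := ih j hj; simp; omega

lemma dotIdxs_pairwise (l : List Char) : (dotIdxs l).Pairwise (· < ·) := by
  induction l with
  | nil => simp [dotIdxs]
  | cons c rest ih =>
    simp only [dotIdxs]
    rw [List.pairwise_append]
    refine ⟨by split <;> simp, ih.map _ (by omega), ?_⟩
    intro a ha b hb
    simp only [List.mem_map] at hb
    obtain ⟨j, hj, rfl⟩ := hb
    have : a = 0 := by split at ha <;> simp_all
    omega

lemma dotIdxs_append (l m : List Char) :
    dotIdxs (l ++ m) = dotIdxs l ++ (dotIdxs m).map (· + l.length) := by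
  induction l with
  | nil => simp [dotIdxs]
  | cons c rest ih =>
    simp only [List.cons_append, dotIdxs, ih, List.map_append, List.map_map]
    simp only [List.append_assoc, List.length_cons]
    refine congrArg₂ _ rfl (congrArg₂ _ rfl ?_)
    exact List.map_congr_left fun a _ => by simp only [Function.comp_apply]; omega

lemma rpredDot_snoc (l : List Char) (c : Char) :
    rpredDot (l ++ [c]) = if c = '.' then l else rpredDot l := by
  unfold rpredDot
  rw [List.reverse_append]
  by_cases hc : c = '.'
  · subst hc; simp
  · simp [hc]

lemma dotIdxs_take (l : List Char) :
    ∀ ds i, dotIdxs l = ds ++ [i] → rpredDot l = l.take i ∧ dotIdxs (l.take i) = ds := by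
  induction l using List.reverseRecOn with
  | nil => intro ds i h; simp [dotIdxs] at h
  | append_singleton l c ih =>
    intro ds i h
    rw [dotIdxs_append] at h
    by_cases hc : c = '.'
    · subst hc
      simp [dotIdxs] at h
      obtain ⟨rfl, rfl⟩ := h
      rw [rpredDot_snoc]
      simp
    · simp [dotIdxs, hc] at h
      have hi : i < l.length := by
        have : i ∈ dotIdxs l := by rw [h]; simp
        exact dotIdxs_lt l i this
      obtain ⟨h1, h2⟩ := ih ds i h
      rw [rpredDot_snoc, if_neg hc, h1]
      rw [List.take_append_of_le_length (by omega)]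
      exact ⟨rfl, h2⟩

lemma rpredDot_no_dot (l : List Char) (h : dotIdxs l = []) : rpredDot l = [] := by
  induction l using List.reverseRecOn with
  | nil => rfl
  | append_singleton l c ih =>
    rw [dotIdxs_append] at h
    rcases List.append_eq_nil_iff.mp h with ⟨h1, h2⟩
    by_cases hc : c = '.'
    · subst hc; simp [dotIdxs] at h2
    · rw [rpredDot_snoc, if_neg hc]; exact ih h1

lemma bLoop_take (l : List Char) (i : Nat) :
    ∀ rest, (∀ j ∈ rest, j ≤ i) → bLoop (l.take i) rest = bLoop l rest := by
  intro rest
  induction rest with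
  | nil => intro _; rfl
  | cons j rest ih =>
    intro h
    simp only [bLoop]
    have hj : j ≤ i := h j (by simp)
    rw [List.take_take, Nat.min_eq_left hj, ih (fun k hk => h k (by simp [hk]))]

lemma treeAux_eq (l : List Char) :
    treeAux l = if l = [] then [] else l :: bLoop l (dotIdxs l).reverse := by
  induction hn : l.length using Nat.strong_induction_on generalizing l with
  | _ n ih =>
  subst hn
  by_cases hl : l = []
  · simp [hl, treeAux]
  · rw [treeAux, dif_neg hl, if_neg hl]
    congr 1
    cases hd : (dotIdxs l).reverse with
    | nil =>
      have : dotIdxs l = [] := by simpa using congrArg List.reverse hd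
      rw [rpredDot_no_dot l this, treeAux]
      simp [bLoop]
    | cons i rest =>
      have hdl : dotIdxs l = rest.reverse ++ [i] := by
        have := congrArg List.reverse hd
        simpa using this
      obtain ⟨h1, h2⟩ := dotIdxs_take l rest.reverse i hdl
      simp only [bLoop]
      by_cases hi : i = 0
      · subst hi
        rw [h1, List.take_zero, treeAux]
        simp
      · rw [if_neg hi, h1]
        have hilen : i < l.length := dotIdxs_lt l i (by rw [hdl]; simp)
        have htne : l.take i ≠ [] := by
          rw [Ne, List.take_eq_nil_iff]
          push Not
          exact ⟨hi, hl⟩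
        have hlt : (l.take i).length < l.length := by
          simp [List.length_take]; omega
        rw [ih (l.take i).length hlt (l.take i) rfl, if_neg htne, h2,
          List.reverse_reverse]
        congr 1
        · apply bLoop_take
          intro j hj
          have hmem : j ∈ rest.reverse := by simpa using hj
          have hpw := dotIdxs_pairwise l
          rw [hdl] at hpw
          have := (List.pairwise_append.mp hpw).2.2 j hmem i (by simp)
          omega

-- ===== VERDICT (by name: the statement is the Claim_ definition above) =====
theorem module_tree_spec : Claim_equal_module_tree := by
  intro module _
  unfold Spec_module_tree module_tree module_tree_alt
  rw [treeAux_eq]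
  by_cases h : module.toList = [] <;> simp [h]
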